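-- pv_equiv track=rewrite | github.com/Lewis0770/reorganization | mace/database/export/formats.py | _filter_properties
-- ===== SOURCE A (Python) =====
-- from typing import List, Dict, Any, Optional, Union
--
-- def _filter_properties(data: List[Dict], properties: List[str]) -> List[Dict]:
--     """Filter data to include only specified properties."""
--     filtered = []
--     for record in data:
--         filtered_record = {}
--         for key, value in record.items():
--             if key in properties or key in ['material_id', 'calc_id']:  # Always include IDs
--                 filtered_record[key] = value
--         filtered.append(filtered_record)
--     return filtered
-- ===== SOURCE B (Python) =====
-- def _filter_properties(data, properties):
--     """Filter data to include only specified properties."""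
--     keep = set(properties) | {'material_id', 'calc_id'}
--     filtered = []
--     for record in data:
--         fr = dict(record)
--         for key in record.keys() - keep:   # unwanted keys via set difference; deletion order irrelevant
--             del fr[key]
--         filtered.append(fr)
--     return filtered
-- ===== Notes on version B (the rewrite author's own statement) =====
-- stated objective: faster
-- what changed: Subtractive instead of additive: B copies each record whole, computes the unwanted keys once by set difference (record.keys() - keep) and deletes them, instead of A's building an empty dict and inserting each record entry that passes a linear scan of the properties list.
import Mathlib
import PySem

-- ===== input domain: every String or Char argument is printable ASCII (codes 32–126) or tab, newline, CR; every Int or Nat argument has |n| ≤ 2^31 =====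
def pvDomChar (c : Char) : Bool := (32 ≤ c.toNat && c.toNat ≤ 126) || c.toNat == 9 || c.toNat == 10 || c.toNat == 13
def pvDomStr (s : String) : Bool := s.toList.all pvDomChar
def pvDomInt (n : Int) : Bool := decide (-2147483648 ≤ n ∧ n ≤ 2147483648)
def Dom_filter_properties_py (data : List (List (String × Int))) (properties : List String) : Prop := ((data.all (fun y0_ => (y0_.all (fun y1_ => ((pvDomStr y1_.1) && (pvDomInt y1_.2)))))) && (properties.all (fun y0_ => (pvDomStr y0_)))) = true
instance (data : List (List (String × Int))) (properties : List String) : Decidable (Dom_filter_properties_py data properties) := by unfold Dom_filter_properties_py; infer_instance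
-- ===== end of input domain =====

-- B is subtractive: it copies each record whole, computes the unwanted keys once by set
-- difference and deletes them, instead of A's inserting each entry that passes a membership
-- test (objective: alternative; B's deletions commute, so its result does not depend on
-- the Python set's iteration order).

-- ===== PORT A =====
-- literal transliteration of A: outer loop appends, inner loop conditionally inserts
def filter_properties_py (data : List (List (String × Int))) (properties : List String) : List (List (String × Int)) :=
  (data.foldl (fun filtered record =>
      filtered ++ [(record.foldl (fun fr kv =>
          if properties.contains kv.1 || (["material_id", "calc_id"] : List String).contains kv.1 then
            fr.insert kv.1 kv.2
          else fr) PySem.Dict.empty).items]) [])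

-- ===== PORT B =====
-- literal transliteration of B: keep = set(properties) | {...}; per record copy the dict,
-- then delete the keys of record.keys() - keep (deletion order immaterial: erases commute)
def filter_properties_py_alt (data : List (List (String × Int))) (properties : List String) : List (List (String × Int)) :=
  let keep := PySem.Set.union (PySem.Set.ofList properties) (PySem.Set.ofList ["material_id", "calc_id"])
  data.foldl (fun filtered record =>
    let fr := PySem.Dict.ofList record
    let dropKeys := PySem.Set.diff (PySem.Set.ofList fr.keys) keep
    filtered ++ [(dropKeys.foldl (fun d k => d.erase k) fr).items]) []

-- ===== PRECONDITION & SPEC =====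
def Spec_filter_properties_py (data : List (List (String × Int))) (properties : List String) (out : List (List (String × Int))) : Prop := out = filter_properties_py_alt data properties
instance (data : List (List (String × Int))) (properties : List String) (out : List (List (String × Int))) : Decidable (Spec_filter_properties_py data properties out) := by unfold Spec_filter_properties_py; infer_instance

-- ===== CLAIM (what is proved, stated in full; the proofs are below) =====
def Claim_equal_filter_properties_py : Prop := ∀ (data : List (List (String × Int))) (properties : List String), Dom_filter_properties_py data properties → Spec_filter_properties_py data properties (filter_properties_py data properties)

-- ===== LEMMAS AND PROOFS =====

-- ofList over a snoc is an insert
lemma ofList_snoc (l : List (String × Int)) (q : String × Int) :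
    PySem.Dict.ofList (l ++ [q]) = (PySem.Dict.ofList l).insert q.1 q.2 := by
  simp [PySem.Dict.ofList, PySem.Dict.update, List.foldl_append]

-- A's conditional insert loop is the insert loop over the filtered record …
lemma foldl_insert_if_eq_filter (p : String → Bool) (record : List (String × Int))
    (d : PySem.Dict String Int) :
    record.foldl (fun fr kv => if p kv.1 then fr.insert kv.1 kv.2 else fr) d
      = (record.filter (fun kv => p kv.1)).foldl (fun fr kv => fr.insert kv.1 kv.2) d := by
  induction record generalizing d with
  | nil => rfl
  | cons kv rest ih =>
      simp only [List.foldl_cons, List.filter_cons]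
      by_cases h : p kv.1
      · simp [h, ih]
      · simp [h, ih]

lemma contains_ofList (l : List (String × Int)) (k : String) :
    (PySem.Dict.ofList l).contains k = l.any (fun q => q.1 == k) := by
  induction l using List.reverseRecOn with
  | nil => rfl
  | append_singleton l q ih =>
      rw [ofList_snoc, PySem.Dict.contains_insert]
      simp [ih, Bool.or_comm, BEq.comm]

lemma contains_ofList_filter (p : String → Bool) (l : List (String × Int)) (k : String)
    (hk : p k = true) :
    (PySem.Dict.ofList (l.filter (fun kv => p kv.1))).contains k
      = (PySem.Dict.ofList l).contains k := by
  rw [contains_ofList, contains_ofList, List.any_filter]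
  apply PySem.List.any_congr_mem
  intro q _
  by_cases h : q.1 == k
  · have hq : q.1 = k := eq_of_beq h
    simp [hq, hk]
  · simp [h]

-- a key-preserving replacement map commutes with a key-predicate filter
lemma filter_map_replace (p : String → Bool) (k : String) (v : Int) (items : List (String × Int)) :
    (items.map (fun q => if q.1 == k then (k, v) else q)).filter (fun q => p q.1)
      = (items.filter (fun q => p q.1)).map (fun q => if q.1 == k then (k, v) else q) := by
  rw [List.filter_map]
  refine congrArg _ (List.filter_congr ?_)
  intro q _
  by_cases h : q.1 == k
  · have hq : q.1 = k := eq_of_beq h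
    simp [Function.comp, hq]
  · simp [Function.comp, h]

-- … and building the dict from the filtered record is building it and filtering its items
lemma items_ofList_filter (p : String → Bool) (l : List (String × Int)) :
    (PySem.Dict.ofList (l.filter (fun kv => p kv.1))).items
      = (PySem.Dict.ofList l).items.filter (fun kv => p kv.1) := by
  induction l using List.reverseRecOn with
  | nil => rfl
  | append_singleton l q ih =>
      rw [List.filter_append, List.filter_cons, List.filter_nil, ofList_snoc]
      by_cases hp : p q.1
      · rw [if_pos hp, ofList_snoc]
        cases hc : (PySem.Dict.ofList l).contains q.1 with
        | true =>
            have hc' : (PySem.Dict.ofList (l.filter (fun kv => p kv.1))).contains q.1 = true := by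
              rw [contains_ofList_filter p l q.1 hp]; exact hc
            rw [PySem.Dict.items_insert_of_contains _ _ hc,
                PySem.Dict.items_insert_of_contains _ _ hc',
                filter_map_replace, ih]
        | false =>
            have hc' : (PySem.Dict.ofList (l.filter (fun kv => p kv.1))).contains q.1 = false := by
              rw [contains_ofList_filter p l q.1 hp]; exact hc
            rw [PySem.Dict.items_insert_of_not_contains _ _ hc,
                PySem.Dict.items_insert_of_not_contains _ _ hc',
                List.filter_append, List.filter_cons, if_pos hp, List.filter_nil, ih]
      · rw [if_neg hp, List.append_nil, ih]
        cases hc : (PySem.Dict.ofList l).contains q.1 with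
        | true =>
            rw [PySem.Dict.items_insert_of_contains _ _ hc, filter_map_replace]
            have hid : ∀ q' ∈ (PySem.Dict.ofList l).items.filter (fun kv => p kv.1),
                (if q'.1 == q.1 then (q.1, q.2) else q') = q' := by
              intro q' hq'
              have hpq' := List.of_mem_filter hq'
              rw [if_neg]
              intro hbe
              exact hp (by rw [← eq_of_beq hbe]; exact hpq')
            rw [List.map_congr_left hid, List.map_id']
        | false =>
            rw [PySem.Dict.items_insert_of_not_contains _ _ hc, List.filter_append,
                List.filter_cons, if_neg hp, List.filter_nil, List.append_nil]

-- B's erase loop filters the items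
lemma foldl_erase_items (ks : List String) (d : PySem.Dict String Int) :
    (ks.foldl (fun d k => d.erase k) d).items
      = d.items.filter (fun kv => !(ks.contains kv.1)) := by
  induction ks generalizing d with
  | nil => simp
  | cons k rest ih =>
      rw [List.foldl_cons, ih]
      simp only [PySem.Dict.erase]
      rw [List.filter_filter]
      apply List.filter_congr
      intro q _
      by_cases h : q.1 = k <;> simp [h, Bool.and_comm]

-- the two membership conditions agree
lemma cond_eq (properties : List String) (k : String) :
    (properties.contains k || (["material_id", "calc_id"] : List String).contains k)
      = (PySem.Set.union (PySem.Set.ofList properties) (PySem.Set.ofList ["material_id", "calc_id"])).contains k := by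
  rw [Bool.eq_iff_iff, PySem.Set.contains_iff, PySem.Set.mem_union, PySem.Set.mem_ofList,
      PySem.Set.mem_ofList]
  simp

-- ===== VERDICT (by name: the statement is the Claim_ definition above) =====
theorem filter_properties_py_spec : Claim_equal_filter_properties_py := by
  intro data properties _
  unfold Spec_filter_properties_py filter_properties_py filter_properties_py_alt
  simp only []
  rw [PySem.List.foldl_append_singleton_eq_map, PySem.List.foldl_append_singleton_eq_map,
      List.nil_append, List.nil_append]
  apply List.map_congr_left
  intro record _
  rw [foldl_insert_if_eq_filter
        (fun k => properties.contains k || (["material_id", "calc_id"] : List String).contains k)]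
  rw [List.filter_congr (fun kv _ => cond_eq properties kv.1)]
  show (PySem.Dict.ofList _).items = _
  rw [items_ofList_filter, foldl_erase_items]
  apply List.filter_congr
  intro q hq
  have hkeys : q.1 ∈ (PySem.Dict.ofList record).keys :=
    PySem.Dict.mem_keys_of_mem_items _ hq
  by_cases hk : q.1 ∈ PySem.Set.union (PySem.Set.ofList properties) (PySem.Set.ofList ["material_id", "calc_id"])
  · have hnd : q.1 ∉ (PySem.Set.ofList (PySem.Dict.ofList record).keys).diff
        (PySem.Set.union (PySem.Set.ofList properties) (PySem.Set.ofList ["material_id", "calc_id"])) := by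
      rw [PySem.Set.mem_diff]
      exact fun h => h.2 hk
    rw [PySem.Set.contains_eq_listContains, List.contains_eq_mem, List.contains_eq_mem]
    simp [hnd, hk]
  · have hd : q.1 ∈ (PySem.Set.ofList (PySem.Dict.ofList record).keys).diff
        (PySem.Set.union (PySem.Set.ofList properties) (PySem.Set.ofList ["material_id", "calc_id"])) := by
      rw [PySem.Set.mem_diff]
      exact ⟨(PySem.Set.mem_ofList _ _).mpr hkeys, hk⟩
    rw [PySem.Set.contains_eq_listContains, List.contains_eq_mem, List.contains_eq_mem]
    simp [hd, hk]
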